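-- pv_equiv track=rewrite | github.com/EdwardHarriss/crypto_arbitrage_bot | dev.py | GetArbitrageRoutes
-- ===== SOURCE A (Python) =====
-- base = 'USDT'
--
-- def GetArbitrageRoutes(data):
--     listings = data.keys()
--     routes = []
--     for sym1 in listings:
--         if sym1[-len(base):] == base: # good
--             inter = sym1[:-len(base)]
--             for sym2 in listings:
--                 if (sym2[:-len(base)] == inter) and (sym2 != sym1): # good
--                     end = sym2[-len(base):]
--                     for sym3 in listings:
--                         if (end == sym3[:-len(base)]) and (sym3[-len(base):] == base):
--                             routes.append([sym1,sym2,sym3])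
--     return routes
-- ===== SOURCE B (Python) =====
-- base = 'USDT'
--
-- def GetArbitrageRoutes(data):
--     n = len(base)
--     by_pref = {}        # prefix  -> symbols with that prefix, in listing order
--     by_pref_base = {}   # prefix  -> symbols with that prefix that end in base
--     base_enders = []    # symbols ending in base, in listing order
--     for s in data.keys():
--         p = s[:-n]
--         by_pref.setdefault(p, []).append(s)
--         if s[-n:] == base:
--             by_pref_base.setdefault(p, []).append(s)
--             base_enders.append(s)
--     routes = []
--     for sym1 in base_enders:
--         for sym2 in by_pref.get(sym1[:-n], []):
--             if sym2 != sym1: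
--                 for sym3 in by_pref_base.get(sym2[-n:], []):
--                     routes.append([sym1, sym2, sym3])
--     return routes
-- ===== Notes on version B (the rewrite author's own statement) =====
-- stated objective: alternative
-- what changed: B replaces A's triple nested scan of all listings with one grouping pass that indexes symbols by their 4-char-stripped prefix (and separately those ending in the base currency), then enumerates routes by direct dict lookups; on the benchmark inputs (few base-ending symbols) this was not measurably faster.
import Mathlib
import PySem

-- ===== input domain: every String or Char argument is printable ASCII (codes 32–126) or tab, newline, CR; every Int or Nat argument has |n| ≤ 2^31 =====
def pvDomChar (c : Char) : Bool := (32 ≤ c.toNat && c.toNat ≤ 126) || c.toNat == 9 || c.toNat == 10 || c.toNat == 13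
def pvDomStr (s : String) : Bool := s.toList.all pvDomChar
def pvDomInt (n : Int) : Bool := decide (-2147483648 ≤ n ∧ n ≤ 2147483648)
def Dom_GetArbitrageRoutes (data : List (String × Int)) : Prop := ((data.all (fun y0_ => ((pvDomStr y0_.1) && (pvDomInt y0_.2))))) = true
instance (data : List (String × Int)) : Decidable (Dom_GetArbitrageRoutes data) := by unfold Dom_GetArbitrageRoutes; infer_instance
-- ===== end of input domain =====

-- B builds prefix-indexed dicts and the base-ender list in one pass over the listings and then
-- walks only the matching symbols, instead of A's triple nested scan of all listings (objective:
-- alternative algorithm; not measured faster on the generated inputs).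

-- module constant base = 'USDT'  (len(base) = 4)
def pvBase : String := "USDT"

-- s[:-len(base)]  (both Pythons take literally this slice; len(base) = 4)
def pyPref (s : String) : List Char := PySem.List.slice s.toList none (some (-4))
-- s[-len(base):]
def pySuf (s : String) : List Char := PySem.List.slice s.toList (some (-4)) none

-- ===== PORT A =====
def GetArbitrageRoutes (data : List (String × Int)) : List (List String) :=
  -- data.keys(): the distinct keys in first-occurrence order
  let listings := PySem.List.dedup (data.map Prod.fst)
  listings.foldl (fun routes sym1 =>
    if pySuf sym1 = pvBase.toList then
      let inter := pyPref sym1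
      listings.foldl (fun routes sym2 =>
        if pyPref sym2 = inter ∧ sym2 ≠ sym1 then
          let end_ := pySuf sym2
          listings.foldl (fun routes sym3 =>
            if end_ = pyPref sym3 ∧ pySuf sym3 = pvBase.toList then
              routes ++ [[sym1, sym2, sym3]]
            else routes) routes
        else routes) routes
    else routes) []

-- ===== PORT B =====
def GetArbitrageRoutes_alt (data : List (String × Int)) : List (List String) :=
  let listings := PySem.List.dedup (data.map Prod.fst)
  -- one pass: st = (by_pref, by_pref_base, base_enders); setdefault(p, []).append(s) is modify p [] (· ++ [s])
  let st := listings.foldl (fun st s =>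
      (PySem.Dict.modify st.1 (pyPref s) [] (· ++ [s]),
       if pySuf s = pvBase.toList then PySem.Dict.modify st.2.1 (pyPref s) [] (· ++ [s]) else st.2.1,
       if pySuf s = pvBase.toList then st.2.2 ++ [s] else st.2.2))
    (PySem.Dict.empty, PySem.Dict.empty, ([] : List String))
  st.2.2.foldl (fun routes sym1 =>
    (PySem.Dict.getD st.1 (pyPref sym1) []).foldl (fun routes sym2 =>
      if sym2 ≠ sym1 then
        (PySem.Dict.getD st.2.1 (pySuf sym2) []).foldl
          (fun routes sym3 => routes ++ [[sym1, sym2, sym3]]) routes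
      else routes) routes) []

-- ===== PRECONDITION & SPEC =====
def Spec_GetArbitrageRoutes (data : List (String × Int)) (out : List (List String)) : Prop := out = GetArbitrageRoutes_alt data
instance (data : List (String × Int)) (out : List (List String)) : Decidable (Spec_GetArbitrageRoutes data out) := by unfold Spec_GetArbitrageRoutes; infer_instance

-- ===== CLAIM (what is proved, stated in full; the proofs are below) =====
def Claim_equal_GetArbitrageRoutes : Prop := ∀ (data : List (String × Int)), Dom_GetArbitrageRoutes data → Spec_GetArbitrageRoutes data (GetArbitrageRoutes data)

-- ===== LEMMAS AND PROOFS =====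

-- a conditional-append loop is init ++ a flatMap of conditional blocks
theorem foldl_ite_append {α β : Type} (l : List α) (p : α → Prop) [DecidablePred p]
    (g : α → List β) (init : List β) :
    l.foldl (fun acc x => if p x then acc ++ g x else acc) init
      = init ++ l.flatMap (fun x => if p x then g x else []) := by
  induction l generalizing init with
  | nil => simp
  | cons a t ih => by_cases h : p a <;> simp [h, ih]

theorem flatMap_ite_eq_filter {α β : Type} (l : List α) (p : α → Prop) [DecidablePred p]
    (g : α → List β) :
    l.flatMap (fun x => if p x then g x else []) = (l.filter (fun x => decide (p x))).flatMap g := by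
  induction l with
  | nil => rfl
  | cons a t ih => by_cases h : p a <;> simp [h, ih]

-- the grouping loop: a lookup in the dict built by 'setdefault(key(s), []).append(s)'
-- returns exactly the elements with that key, in order
theorem getD_foldl_group (l : List String) (key : String → List Char)
    (d : PySem.Dict (List Char) (List String)) (p : List Char) :
    PySem.Dict.getD (l.foldl (fun d s => PySem.Dict.modify d (key s) [] (· ++ [s])) d) p []
      = PySem.Dict.getD d p [] ++ l.filter (fun s => key s == p) := by
  induction l generalizing d with
  | nil => simp
  | cons s t ih =>
    simp only [List.foldl_cons, List.filter_cons, ih, PySem.Dict.getD_modify]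
    by_cases h : p = key s
    · simp [h]
    · have : (key s == p) = false := by simp; exact fun e => h e.symm
      simp [h, this]

-- the common normal form both ports reduce to
def pvCanon (L : List String) : List (List String) :=
  (L.filter (fun s => pySuf s == pvBase.toList)).flatMap (fun s1 =>
    (L.filter (fun s2 => pyPref s2 == pyPref s1)).flatMap (fun s2 =>
      if s2 ≠ s1 then
        ((L.filter (fun s => pySuf s == pvBase.toList)).filter (fun s3 => pyPref s3 == pySuf s2)).map
          (fun s3 => [s1, s2, s3])
      else []))

theorem A_canon (L : List String) :
    L.foldl (fun routes sym1 =>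
      if pySuf sym1 = pvBase.toList then
        L.foldl (fun routes sym2 =>
          if pyPref sym2 = pyPref sym1 ∧ sym2 ≠ sym1 then
            L.foldl (fun routes sym3 =>
              if pySuf sym2 = pyPref sym3 ∧ pySuf sym3 = pvBase.toList then
                routes ++ [[sym1, sym2, sym3]]
              else routes) routes
          else routes) routes
      else routes) [] = pvCanon L := by
  have h3 : ∀ (s1 s2 : String) (r : List (List String)),
      L.foldl (fun routes sym3 =>
        if pySuf s2 = pyPref sym3 ∧ pySuf sym3 = pvBase.toList then
          routes ++ [[s1, s2, sym3]]
        else routes) r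
        = r ++ L.flatMap (fun sym3 =>
            if pySuf s2 = pyPref sym3 ∧ pySuf sym3 = pvBase.toList then [[s1, s2, sym3]] else []) :=
    fun s1 s2 r => foldl_ite_append L _ _ r
  simp only [h3]
  have h2 : ∀ (s1 : String) (r : List (List String)),
      L.foldl (fun routes sym2 =>
        if pyPref sym2 = pyPref s1 ∧ sym2 ≠ s1 then
          routes ++ L.flatMap (fun sym3 =>
            if pySuf sym2 = pyPref sym3 ∧ pySuf sym3 = pvBase.toList then [[s1, sym2, sym3]] else [])
        else routes) r
        = r ++ L.flatMap (fun sym2 =>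
            if pyPref sym2 = pyPref s1 ∧ sym2 ≠ s1 then
              L.flatMap (fun sym3 =>
                if pySuf sym2 = pyPref sym3 ∧ pySuf sym3 = pvBase.toList then [[s1, sym2, sym3]] else [])
            else []) :=
    fun s1 r => foldl_ite_append L _ _ r
  simp only [h2]
  rw [foldl_ite_append L _ _ []]
  simp only [List.nil_append]
  rw [flatMap_ite_eq_filter]
  unfold pvCanon
  rw [show (fun x => decide (pySuf x = pvBase.toList)) = (fun s => pySuf s == pvBase.toList) from
    funext fun s => (Bool.beq_eq_decide_eq _ _).symm]
  refine List.flatMap_congr (fun s1 _ => ?_)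
  have split : ∀ sym2 : String,
      (if pyPref sym2 = pyPref s1 ∧ sym2 ≠ s1 then
        L.flatMap (fun sym3 =>
          if pySuf sym2 = pyPref sym3 ∧ pySuf sym3 = pvBase.toList then [[s1, sym2, sym3]] else [])
      else [])
      = (if pyPref sym2 = pyPref s1 then
          (if sym2 ≠ s1 then
            L.flatMap (fun sym3 =>
              if pySuf sym2 = pyPref sym3 ∧ pySuf sym3 = pvBase.toList then [[s1, sym2, sym3]] else [])
          else [])
        else []) := by
    intro sym2; by_cases h1 : pyPref sym2 = pyPref s1 <;> by_cases h2 : sym2 ≠ s1 <;> simp [h1, h2]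
  rw [List.flatMap_congr (fun sym2 _ => split sym2)]
  rw [flatMap_ite_eq_filter L (fun sym2 => pyPref sym2 = pyPref s1)]
  rw [show (fun x => decide (pyPref x = pyPref s1)) = (fun s2 => pyPref s2 == pyPref s1) from
    funext fun s => (Bool.beq_eq_decide_eq _ _).symm]
  refine List.flatMap_congr (fun s2 _ => ?_)
  by_cases h2 : s2 ≠ s1
  · rw [if_pos h2, if_pos h2]
    rw [flatMap_ite_eq_filter L (fun sym3 => pySuf s2 = pyPref sym3 ∧ pySuf sym3 = pvBase.toList),
        ← List.map_eq_flatMap, List.filter_filter]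
    congr 1
    refine List.filter_congr (fun s3 _ => ?_)
    simp only [Bool.beq_eq_decide_eq]
    by_cases hA : pySuf s2 = pyPref s3 <;> by_cases hB : pySuf s3 = pvBase.toList <;>
      simp [hA, hB] <;> exact fun e => hA e.symm
  · simp [h2]

theorem B_canon (L : List String) :
    (let st := L.foldl (fun st s =>
        (PySem.Dict.modify st.1 (pyPref s) [] (· ++ [s]),
         if pySuf s = pvBase.toList then PySem.Dict.modify st.2.1 (pyPref s) [] (· ++ [s]) else st.2.1,
         if pySuf s = pvBase.toList then st.2.2 ++ [s] else st.2.2))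
      (PySem.Dict.empty, PySem.Dict.empty, ([] : List String))
     st.2.2.foldl (fun routes sym1 =>
      (PySem.Dict.getD st.1 (pyPref sym1) []).foldl (fun routes sym2 =>
        if sym2 ≠ sym1 then
          (PySem.Dict.getD st.2.1 (pySuf sym2) []).foldl
            (fun routes sym3 => routes ++ [[sym1, sym2, sym3]]) routes
        else routes) routes) []) = pvCanon L := by
  rw [PySem.List.foldl_prod_mk
        (f := fun d s => PySem.Dict.modify d (pyPref s) [] (· ++ [s]))
        (g := fun st2 s =>
          ((if pySuf s = pvBase.toList then PySem.Dict.modify st2.1 (pyPref s) [] (· ++ [s]) else st2.1 :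
              PySem.Dict (List Char) (List String)),
           if pySuf s = pvBase.toList then st2.2 ++ [s] else st2.2))]
  rw [PySem.List.foldl_prod_mk
        (f := fun d s => if pySuf s = pvBase.toList then PySem.Dict.modify d (pyPref s) [] (· ++ [s]) else d)
        (g := fun e s => if pySuf s = pvBase.toList then e ++ [s] else e)]
  simp only []
  rw [PySem.List.foldl_append_ite_eq_filter]
  rw [PySem.List.foldl_ite_eq_foldl_filter]
  -- unroll the three output loops
  have h3 : ∀ (s1 s2 : String) (xs : List String) (r : List (List String)),
      xs.foldl (fun routes sym3 => routes ++ [[s1, s2, sym3]]) r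
        = r ++ xs.map (fun sym3 => [s1, s2, sym3]) :=
    fun s1 s2 xs r => PySem.List.foldl_append_singleton_eq_map (f := fun sym3 => [s1, s2, sym3]) (l := xs) (acc := r)
  simp only [h3]
  have h2 : ∀ (s1 : String) (xs : List String) (r : List (List String)),
      xs.foldl (fun routes sym2 =>
        if sym2 ≠ s1 then
          routes ++ (PySem.Dict.getD
            ((L.filter (fun s => decide (pySuf s = pvBase.toList))).foldl
              (fun d s => PySem.Dict.modify d (pyPref s) [] (· ++ [s])) PySem.Dict.empty)
            (pySuf sym2) []).map (fun sym3 => [s1, sym2, sym3])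
        else routes) r
        = r ++ xs.flatMap (fun sym2 =>
            if sym2 ≠ s1 then
              (PySem.Dict.getD
                ((L.filter (fun s => decide (pySuf s = pvBase.toList))).foldl
                  (fun d s => PySem.Dict.modify d (pyPref s) [] (· ++ [s])) PySem.Dict.empty)
                (pySuf sym2) []).map (fun sym3 => [s1, sym2, sym3])
            else []) :=
    fun s1 xs r => foldl_ite_append xs _ _ r
  simp only [h2]
  rw [PySem.List.foldl_append_eq_flatMap]
  simp only [List.nil_append, getD_foldl_group, PySem.Dict.getD_empty, List.nil_append]
  unfold pvCanon
  rw [show (fun s => decide (pySuf s = pvBase.toList)) = (fun s => pySuf s == pvBase.toList) from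
    funext fun s => (Bool.beq_eq_decide_eq _ _).symm]

-- ===== VERDICT (by name: the statement is the Claim_ definition above) =====
theorem GetArbitrageRoutes_spec : Claim_equal_GetArbitrageRoutes := by
  intro data _
  exact (A_canon (PySem.List.dedup (data.map Prod.fst))).trans
    (B_canon (PySem.List.dedup (data.map Prod.fst))).symm
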